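-- pv_equiv track=rewrite | github.com/namkhanh1123/maplecli | main.py | detect_architecture_patterns
-- ===== SOURCE A (Python) =====
-- from typing import List, Dict, Optional, Tuple, Set, Union, AsyncIterator
--
-- def detect_architecture_patterns(files: List[str]) -> Dict[str, int]:
--     """Identify architectural patterns (MVC, microservices, etc.)."""
--     patterns = {
--         'mvc': 0,
--         'microservices': 0,
--         'serverless': 0,
--         'monolith': 0,
--         'modular': 0,
--         'event_driven': 0,
--         'repository': 0
--     }
--
--     # Check for MVC pattern
--     mvc_indicators = ['controller', 'model', 'view', 'models/', 'views/', 'controllers/']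
--     for indicator in mvc_indicators:
--         if any(indicator in f.lower() for f in files):
--             patterns['mvc'] += 1
--
--     # Check for microservices
--     microservice_indicators = ['service-', '-service/', 'services/', 'api/', 'gateway/']
--     for indicator in microservice_indicators:
--         if any(indicator in f.lower() for f in files):
--             patterns['microservices'] += 1
--
--     # Check for serverless
--     serverless_indicators = ['functions/', 'lambda/', 'api/', 'netlify/', 'vercel/']
--     for indicator in serverless_indicators:
--         if any(indicator in f.lower() for f in files):
--             patterns['serverless'] += 1
--
--     # Check for modular architecture
--     modular_indicators = ['modules/', 'components/', 'lib/', 'utils/', 'common/']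
--     for indicator in modular_indicators:
--         if any(indicator in f.lower() for f in files):
--             patterns['modular'] += 1
--
--     # Check for repository pattern
--     repo_indicators = ['repository', 'repositories/', 'dao/', 'persistence/']
--     for indicator in repo_indicators:
--         if any(indicator in f.lower() for f in files):
--             patterns['repository'] += 1
--
--     return patterns
-- ===== SOURCE B (Python) =====
-- PATTERN_INDICATORS = {
--     'mvc': ['controller', 'model', 'view', 'models/', 'views/', 'controllers/'],
--     'microservices': ['service-', '-service/', 'services/', 'api/', 'gateway/'],
--     'serverless': ['functions/', 'lambda/', 'api/', 'netlify/', 'vercel/'],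
--     'modular': ['modules/', 'components/', 'lib/', 'utils/', 'common/'],
--     'repository': ['repository', 'repositories/', 'dao/', 'persistence/'],
-- }
--
-- def detect_architecture_patterns(files):
--     """Identify architectural patterns (MVC, microservices, etc.)."""
--     all_indicators = set()
--     for inds in PATTERN_INDICATORS.values():
--         all_indicators |= set(inds)
--     matched = set()
--     for f in files:
--         fl = f.lower()
--         matched.update(i for i in all_indicators if i in fl)
--     return {
--         'mvc': len(matched & set(PATTERN_INDICATORS['mvc'])),
--         'microservices': len(matched & set(PATTERN_INDICATORS['microservices'])),
--         'serverless': len(matched & set(PATTERN_INDICATORS['serverless'])),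
--         'monolith': 0,
--         'modular': len(matched & set(PATTERN_INDICATORS['modular'])),
--         'event_driven': 0,
--         'repository': len(matched & set(PATTERN_INDICATORS['repository'])),
--     }
-- ===== Notes on version B (the rewrite author's own statement) =====
-- stated objective: faster
-- what changed: Instead of A's five loops that each rescan all files per indicator, B makes one pass over the files maintaining a set of matched indicators and derives each pattern's count as the size of the intersection of that set with the pattern's indicator list (the always-zero 'monolith' and 'event_driven' keys stay explicit zeros).
import Mathlib
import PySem

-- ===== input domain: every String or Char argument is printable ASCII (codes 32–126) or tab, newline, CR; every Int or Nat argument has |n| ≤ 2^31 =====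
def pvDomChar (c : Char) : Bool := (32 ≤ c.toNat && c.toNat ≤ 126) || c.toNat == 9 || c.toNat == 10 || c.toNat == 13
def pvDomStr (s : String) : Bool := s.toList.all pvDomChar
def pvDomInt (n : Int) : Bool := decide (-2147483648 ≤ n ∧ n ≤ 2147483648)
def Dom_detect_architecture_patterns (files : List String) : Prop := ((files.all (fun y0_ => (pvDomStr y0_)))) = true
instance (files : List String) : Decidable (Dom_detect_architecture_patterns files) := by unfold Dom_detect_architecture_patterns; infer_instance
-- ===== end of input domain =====

-- B replaces A's five per-indicator rescans of `files` with ONE pass over `files` that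
-- maintains a set of matched indicators, then reads each pattern's count off that set
-- by intersection (objective: faster by a constant factor — each file is lowercased once).

-- ===== PORT A =====
-- the five literal indicator lists (verbatim from A)
def pvMvcInd : List String := ["controller", "model", "view", "models/", "views/", "controllers/"]
def pvMicroInd : List String := ["service-", "-service/", "services/", "api/", "gateway/"]
def pvServerlessInd : List String := ["functions/", "lambda/", "api/", "netlify/", "vercel/"]
def pvModularInd : List String := ["modules/", "components/", "lib/", "utils/", "common/"]
def pvRepoInd : List String := ["repository", "repositories/", "dao/", "persistence/"]

-- 'any(indicator in f.lower() for f in files)'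
def pvHit (files : List String) (indicator : String) : Bool :=
  files.any (fun f => PySem.Str.isIn indicator (PySem.Str.lower f))

-- one of A's five loops: 'for indicator in inds: if any(...): patterns[k] += 1'
def pvLoopA (files : List String) (inds : List String) (k : String)
    (d : PySem.Dict String Int) : PySem.Dict String Int :=
  inds.foldl (fun d indicator => if pvHit files indicator then d.modify k 0 (· + 1) else d) d

def detect_architecture_patterns (files : List String) : List (String × Int) :=
  let patterns : PySem.Dict String Int :=
    PySem.Dict.ofList [("mvc", 0), ("microservices", 0), ("serverless", 0),
                       ("monolith", 0), ("modular", 0), ("event_driven", 0), ("repository", 0)]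
  let patterns := pvLoopA files pvMvcInd "mvc" patterns
  let patterns := pvLoopA files pvMicroInd "microservices" patterns
  let patterns := pvLoopA files pvServerlessInd "serverless" patterns
  let patterns := pvLoopA files pvModularInd "modular" patterns
  let patterns := pvLoopA files pvRepoInd "repository" patterns
  patterns.items

-- ===== PORT B =====
-- union of all indicator lists as a set (Source B's all_indicators)
def pvAllInd : PySem.Set String :=
  PySem.Set.update (PySem.Set.update (PySem.Set.update (PySem.Set.update
    (PySem.Set.ofList pvMvcInd) pvMicroInd) pvServerlessInd) pvModularInd) pvRepoInd

-- matched.update(i for i in all_indicators if i in fl) — consumed only as a set below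
def pvMatched (files : List String) : PySem.Set String :=
  files.foldl (fun matched f =>
    PySem.Set.update matched (pvAllInd.filter (fun i => PySem.Str.isIn i (PySem.Str.lower f))))
    PySem.Set.empty

def detect_architecture_patterns_alt (files : List String) : List (String × Int) :=
  let matched := pvMatched files
  [("mvc", PySem.Set.len (PySem.Set.inter matched (PySem.Set.ofList pvMvcInd))),
   ("microservices", PySem.Set.len (PySem.Set.inter matched (PySem.Set.ofList pvMicroInd))),
   ("serverless", PySem.Set.len (PySem.Set.inter matched (PySem.Set.ofList pvServerlessInd))),
   ("monolith", 0),
   ("modular", PySem.Set.len (PySem.Set.inter matched (PySem.Set.ofList pvModularInd))),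
   ("event_driven", 0),
   ("repository", PySem.Set.len (PySem.Set.inter matched (PySem.Set.ofList pvRepoInd)))]

-- ===== PRECONDITION & SPEC =====
def Spec_detect_architecture_patterns (files : List String) (out : List (String × Int)) : Prop := out = detect_architecture_patterns_alt files
instance (files : List String) (out : List (String × Int)) : Decidable (Spec_detect_architecture_patterns files out) := by unfold Spec_detect_architecture_patterns; infer_instance

-- ===== CLAIM (what is proved, stated in full; the proofs are below) =====
def Claim_equal_detect_architecture_patterns : Prop := ∀ (files : List String), Dom_detect_architecture_patterns files → Spec_detect_architecture_patterns files (detect_architecture_patterns files)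

-- ===== LEMMAS AND PROOFS =====

-- A's loop for pattern k adds, to entry k', the number of its indicators that occur in some file
theorem pvLoopA_getD (files : List String) (inds : List String) (k : String)
    (d : PySem.Dict String Int) (k' : String) :
    (pvLoopA files inds k d).getD k' 0 =
      d.getD k' 0 + (if k' = k then (inds.countP (pvHit files) : Int) else 0) := by
  induction inds generalizing d with
  | nil => simp [pvLoopA]
  | cons i rest ih =>
    simp only [pvLoopA, List.foldl_cons] at ih ⊢
    by_cases hp : pvHit files i
    · rw [if_pos hp, ih, PySem.Dict.getD_modify]
      simp only [List.countP_cons, hp, if_true]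
      by_cases hk : k' = k
      · subst hk; simp; ring
      · simp [hk]
    · rw [if_neg hp, ih]
      simp [hp]

-- A's loop leaves the key list unchanged (k is already a key)
theorem pvLoopA_keys (files : List String) (inds : List String) (k : String)
    (d : PySem.Dict String Int) (h : d.contains k = true) :
    (pvLoopA files inds k d).keys = d.keys := by
  induction inds generalizing d with
  | nil => simp [pvLoopA]
  | cons i rest ih =>
    simp only [pvLoopA, List.foldl_cons] at ih ⊢
    by_cases hp : pvHit files i
    · rw [if_pos hp, ih _ (by rw [PySem.Dict.contains_modify]; simp [h]),
          PySem.Dict.keys_modify, PySem.Dict.keys_insert_of_contains _ _ h]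
    · rw [if_neg hp]; exact ih d h

theorem pvLoopA_contains (files : List String) (inds : List String) (k : String)
    (d : PySem.Dict String Int) (k'' : String) (h : d.contains k = true) :
    (pvLoopA files inds k d).contains k'' = d.contains k'' := by
  rw [PySem.Dict.contains_eq_decide_mem_keys, PySem.Dict.contains_eq_decide_mem_keys,
      pvLoopA_keys files inds k d h]

-- membership in B's matched set
theorem mem_pvMatched (files : List String) (y : String) :
    y ∈ pvMatched files ↔ y ∈ pvAllInd ∧ pvHit files y = true := by
  have h : ∀ (fs : List String) (m : PySem.Set String),
      y ∈ fs.foldl (fun matched f =>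
        PySem.Set.update matched (pvAllInd.filter (fun i => PySem.Str.isIn i (PySem.Str.lower f)))) m
      ↔ y ∈ m ∨ (y ∈ pvAllInd ∧ ∃ f ∈ fs, PySem.Str.isIn y (PySem.Str.lower f) = true) := by
    intro fs
    induction fs with
    | nil => simp
    | cons f rest ih =>
      intro m
      simp only [List.foldl_cons, ih, PySem.Set.mem_update, List.mem_filter, List.mem_cons]
      constructor
      · rintro ((hm | ⟨ha, hf⟩) | ⟨ha, g, hg, hgy⟩)
        · exact Or.inl hm
        · exact Or.inr ⟨ha, f, Or.inl rfl, hf⟩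
        · exact Or.inr ⟨ha, g, Or.inr hg, hgy⟩
      · rintro (hm | ⟨ha, g, (rfl | hg), hgy⟩)
        · exact Or.inl (Or.inl hm)
        · exact Or.inl (Or.inr ⟨ha, hgy⟩)
        · exact Or.inr ⟨ha, g, hg, hgy⟩
  unfold pvMatched pvHit
  rw [h]
  simp [PySem.Set.empty, List.any_eq_true]

theorem nodup_pvMatched (files : List String) : (pvMatched files).Nodup := by
  have h : ∀ (fs : List String) (m : PySem.Set String), m.Nodup →
      (fs.foldl (fun matched f =>
        PySem.Set.update matched (pvAllInd.filter (fun i => PySem.Str.isIn i (PySem.Str.lower f)))) m).Nodup := by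
    intro fs
    induction fs with
    | nil => exact fun m hm => hm
    | cons f rest ih => exact fun m hm => ih _ (PySem.Set.nodup_update _ _ hm)
  exact h files _ List.nodup_nil

-- B's intersection count equals A's per-indicator count
theorem pv_len_inter (files : List String) (p : List String) (hnd : p.Nodup)
    (hsub : ∀ y ∈ p, y ∈ pvAllInd) :
    PySem.Set.len (PySem.Set.inter (pvMatched files) (PySem.Set.ofList p)) =
      (p.countP (pvHit files) : Int) := by
  have hmem : ∀ y, y ∈ PySem.Set.inter (pvMatched files) (PySem.Set.ofList p)
      ↔ y ∈ p.filter (pvHit files) := by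
    intro y
    rw [PySem.Set.mem_inter, PySem.Set.mem_ofList, mem_pvMatched, List.mem_filter]
    constructor
    · rintro ⟨⟨_, hy⟩, hp⟩; exact ⟨hp, hy⟩
    · rintro ⟨hp, hy⟩; exact ⟨⟨hsub y hp, hy⟩, hp⟩
  have h1 := PySem.Set.nodup_inter (pvMatched files) (PySem.Set.ofList p) (nodup_pvMatched files)
  have h2 : (p.filter (pvHit files)).Nodup := hnd.filter _
  have hperm := (List.perm_ext_iff_of_nodup h1 h2).2 hmem
  simp [PySem.Set.len, hperm.length_eq, List.countP_eq_length_filter]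

-- ===== VERDICT (by name: the statement is the Claim_ definition above) =====
theorem detect_architecture_patterns_spec : Claim_equal_detect_architecture_patterns := by
  intro files _
  show detect_architecture_patterns files = detect_architecture_patterns_alt files
  unfold detect_architecture_patterns detect_architecture_patterns_alt
  dsimp only []
  rw [pv_len_inter files pvMvcInd (by decide) (by decide),
      pv_len_inter files pvMicroInd (by decide) (by decide),
      pv_len_inter files pvServerlessInd (by decide) (by decide),
      pv_len_inter files pvModularInd (by decide) (by decide),
      pv_len_inter files pvRepoInd (by decide) (by decide)]
  set d0 : PySem.Dict String Int :=
    PySem.Dict.ofList [("mvc", 0), ("microservices", 0), ("serverless", 0),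
                       ("monolith", 0), ("modular", 0), ("event_driven", 0), ("repository", 0)] with hd0
  have c1 : d0.contains "mvc" = true := by rw [hd0]; decide
  have c2 : (pvLoopA files pvMvcInd "mvc" d0).contains "microservices" = true := by
    rw [pvLoopA_contains _ _ _ _ _ c1, hd0]; decide
  have c3 : (pvLoopA files pvMicroInd "microservices" (pvLoopA files pvMvcInd "mvc" d0)).contains "serverless" = true := by
    rw [pvLoopA_contains _ _ _ _ _ c2, pvLoopA_contains _ _ _ _ _ c1, hd0]; decide
  have c4 : (pvLoopA files pvServerlessInd "serverless" (pvLoopA files pvMicroInd "microservices" (pvLoopA files pvMvcInd "mvc" d0))).contains "modular" = true := by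
    rw [pvLoopA_contains _ _ _ _ _ c3, pvLoopA_contains _ _ _ _ _ c2, pvLoopA_contains _ _ _ _ _ c1, hd0]; decide
  have c5 : (pvLoopA files pvModularInd "modular" (pvLoopA files pvServerlessInd "serverless" (pvLoopA files pvMicroInd "microservices" (pvLoopA files pvMvcInd "mvc" d0)))).contains "repository" = true := by
    rw [pvLoopA_contains _ _ _ _ _ c4, pvLoopA_contains _ _ _ _ _ c3, pvLoopA_contains _ _ _ _ _ c2, pvLoopA_contains _ _ _ _ _ c1, hd0]; decide
  have hkeys : (pvLoopA files pvRepoInd "repository" (pvLoopA files pvModularInd "modular" (pvLoopA files pvServerlessInd "serverless" (pvLoopA files pvMicroInd "microservices" (pvLoopA files pvMvcInd "mvc" d0))))).keys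
      = ["mvc", "microservices", "serverless", "monolith", "modular", "event_driven", "repository"] := by
    rw [pvLoopA_keys _ _ _ _ c5, pvLoopA_keys _ _ _ _ c4, pvLoopA_keys _ _ _ _ c3,
        pvLoopA_keys _ _ _ _ c2, pvLoopA_keys _ _ _ _ c1, hd0]
    decide
  rw [PySem.Dict.items_eq_map_keys _ (by rw [hkeys]; decide) 0, hkeys]
  simp only [List.map_cons, List.map_nil, pvLoopA_getD]
  have hg : ∀ k : String, k ∈ ["mvc", "microservices", "serverless", "monolith", "modular", "event_driven", "repository"] → d0.getD k 0 = 0 := by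
    rw [hd0]; decide
  simp [hg, List.mem_cons]
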